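-- pv_equiv track=rewrite | github.com/gauravS0007/costco-html-parser | src/processors/super_enhanced_costco_processor.py | _create_description_from_content
-- ===== SOURCE A (Python) =====
-- def _create_description_from_content(main_content: list) -> str:
--     """Create description from main content"""
--     if not main_content:
--         return ""
--
--     # Find the best paragraph for description
--     for content in main_content:
--         # Skip very short or very long paragraphs
--         if 50 < len(content) < 300:
--             return content
--
--     # Fallback to first substantial paragraph
--     for content in main_content:
--         if len(content) > 100:
--             return content[:200] + "..." if len(content) > 200 else content
--
--     return main_content[0] if main_content else ""
-- ===== SOURCE B (Python) =====
-- def _create_description_from_content(main_content: list) -> str: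
--     """Single pass: return the first 50<len<300 paragraph raw; remember the
--     first len>100 paragraph as fallback and truncate it after the loop."""
--     if not main_content:
--         return ""
--     fallback = None
--     for content in main_content:
--         n = len(content)
--         if 50 < n < 300:
--             return content
--         if fallback is None and n > 100:
--             fallback = content
--     if fallback is not None:
--         return fallback[:200] + "..." if len(fallback) > 200 else fallback
--     return main_content[0]
-- ===== Notes on version B (the rewrite author's own statement) =====
-- stated objective: simpler
-- what changed: Replaces A's two sequential scans over main_content by a single pass that returns a 50<len<300 paragraph immediately and records the first len>100 paragraph in a fallback variable, truncated only after the loop.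
import Mathlib
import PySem

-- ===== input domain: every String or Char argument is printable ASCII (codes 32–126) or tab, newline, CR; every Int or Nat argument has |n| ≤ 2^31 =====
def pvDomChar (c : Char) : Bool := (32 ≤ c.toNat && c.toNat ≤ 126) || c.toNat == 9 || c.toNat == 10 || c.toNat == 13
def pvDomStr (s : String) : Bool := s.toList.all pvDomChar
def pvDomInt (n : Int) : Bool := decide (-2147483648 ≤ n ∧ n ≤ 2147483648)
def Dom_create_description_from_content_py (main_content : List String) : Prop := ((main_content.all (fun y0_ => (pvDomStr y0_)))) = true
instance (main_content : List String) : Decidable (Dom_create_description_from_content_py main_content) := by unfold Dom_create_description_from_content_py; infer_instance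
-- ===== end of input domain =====

-- B replaces A's two sequential scans by one pass with a fallback accumulator (objective: simpler).
-- ===== PORT A =====
-- first loop: return the first paragraph with 50 < len < 300
def aLoop1 : List String → Option String
  | [] => none
  | c :: t => if 50 < PySem.Str.len c ∧ PySem.Str.len c < 300 then some c else aLoop1 t

-- second loop: return the first paragraph with len > 100, truncated to 200 chars + "..." when len > 200
def aLoop2 : List String → Option String
  | [] => none
  | c :: t =>
    if PySem.Str.len c > 100 then
      some (if PySem.Str.len c > 200 then PySem.Str.slice c none (some 200) ++ "..." else c)
    else aLoop2 t

def create_description_from_content_py (main_content : List String) : String :=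
  match main_content with
  | [] => ""
  | h :: _ =>
    match aLoop1 main_content with
    | some c => c
    | none =>
      match aLoop2 main_content with
      | some r => r
      | none => h

-- ===== PORT B =====
-- single pass: inl = early return of a 50<len<300 paragraph, inr = final fallback variable
def bLoop : List String → Option String → String ⊕ Option String
  | [], fb => Sum.inr fb
  | c :: t, fb =>
    if 50 < PySem.Str.len c ∧ PySem.Str.len c < 300 then Sum.inl c
    else bLoop t (if fb = none ∧ PySem.Str.len c > 100 then some c else fb)

def create_description_from_content_py_alt (main_content : List String) : String :=
  match main_content with
  | [] => ""
  | h :: _ =>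
    match bLoop main_content none with
    | Sum.inl c => c
    | Sum.inr (some fb) =>
      if PySem.Str.len fb > 200 then PySem.Str.slice fb none (some 200) ++ "..." else fb
    | Sum.inr none => h

-- ===== PRECONDITION & SPEC =====
def Spec_create_description_from_content_py (main_content : List String) (out : String) : Prop := out = create_description_from_content_py_alt main_content
instance (main_content : List String) (out : String) : Decidable (Spec_create_description_from_content_py main_content out) := by unfold Spec_create_description_from_content_py; infer_instance

-- ===== CLAIM (what is proved, stated in full; the proofs are below) =====
def Claim_equal_create_description_from_content_py : Prop := ∀ (main_content : List String), Dom_create_description_from_content_py main_content → Spec_create_description_from_content_py main_content (create_description_from_content_py main_content)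

-- ===== LEMMAS AND PROOFS =====
-- first paragraph with len > 100, untruncated
def firstLong : List String → Option String
  | [] => none
  | c :: t => if PySem.Str.len c > 100 then some c else firstLong t

def trunc (c : String) : String :=
  if PySem.Str.len c > 200 then PySem.Str.slice c none (some 200) ++ "..." else c

lemma aLoop2_eq (l : List String) : aLoop2 l = (firstLong l).map trunc := by
  induction l with
  | nil => rfl
  | cons c t ih =>
    by_cases h : PySem.Str.len c > 100
    · simp only [aLoop2, firstLong, if_pos h, Option.map_some, trunc]
    · simp only [aLoop2, firstLong, if_neg h]; exact ih

lemma bLoop_eq (l : List String) (fb : Option String) :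
    bLoop l fb =
      match aLoop1 l with
      | some c => Sum.inl c
      | none => Sum.inr (fb.orElse (fun _ => firstLong l)) := by
  induction l generalizing fb with
  | nil => cases fb <;> rfl
  | cons c t ih =>
    by_cases h : 50 < PySem.Str.len c ∧ PySem.Str.len c < 300
    · simp only [bLoop, aLoop1, if_pos h]
    · simp only [bLoop, aLoop1, if_neg h]
      rw [ih]
      cases haL : aLoop1 t with
      | some x => rfl
      | none =>
        simp only [firstLong]
        cases fb with
        | some x => rw [if_neg (by simp)]; rfl
        | none =>
          by_cases h2 : PySem.Str.len c > 100
          · rw [if_pos ⟨rfl, h2⟩, if_pos h2]; rfl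
          · rw [if_neg (fun hc => h2 hc.2), if_neg h2]

-- ===== VERDICT (by name: the statement is the Claim_ definition above) =====
theorem create_description_from_content_py_spec : Claim_equal_create_description_from_content_py := by
  intro mc _
  unfold Spec_create_description_from_content_py
  cases mc with
  | nil => rfl
  | cons h t =>
    simp only [create_description_from_content_py, create_description_from_content_py_alt,
      bLoop_eq, aLoop2_eq]
    cases aLoop1 (h :: t) with
    | some c => rfl
    | none =>
      cases firstLong (h :: t) with
      | none => rfl
      | some fb => rfl
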